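-- pv_equiv track=rewrite | github.com/SongYunSeop/codewar | 10.Mumblig.py | accum
-- ===== SOURCE A (Python) =====
-- def accum(s):
--     # your code
--     result = []
--     for i, w in enumerate(s):
--         tmp = ""
--         for x in range(i+1):
--             tmp += w.upper() if x == 0 else w.lower()
--         result.append(tmp)
--
--     return '-'.join(result)
-- ===== SOURCE B (Python) =====
-- def accum(s):
--     return '-'.join(c.upper() + c.lower() * i for i, c in enumerate(s))
-- ===== Notes on version B (the rewrite author's own statement) =====
-- stated objective: idiomatic
-- what changed: Replaces A's inner character-by-character accumulation loop and intermediate result list with a single dash-join over a generator computing each segment in closed form via string repetition (c.upper() + c.lower()*i).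
import Mathlib
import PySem

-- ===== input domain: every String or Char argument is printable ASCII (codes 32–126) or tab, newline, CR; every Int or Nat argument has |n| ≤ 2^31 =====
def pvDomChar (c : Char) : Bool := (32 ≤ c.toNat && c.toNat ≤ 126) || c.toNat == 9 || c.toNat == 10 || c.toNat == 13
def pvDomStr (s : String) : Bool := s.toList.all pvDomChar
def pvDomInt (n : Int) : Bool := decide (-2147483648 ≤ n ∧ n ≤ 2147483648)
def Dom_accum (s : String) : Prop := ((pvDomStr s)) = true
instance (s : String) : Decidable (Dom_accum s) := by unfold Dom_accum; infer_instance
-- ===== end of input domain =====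

-- B replaces A's inner character-accumulation loop and result list with a single join
-- over per-index closed-form segments (idiomatic; same cost).

-- ===== PORT A =====
-- A: for each (i, w) in enumerate(s), build tmp char by char over range(i+1)
-- (upper at x == 0, else lower), append tmp to result, then '-'.join(result).
def accum (s : String) : String :=
  let result : List (List Char) :=
    (PySem.List.enumerate s.toList).foldl
      (fun acc iw =>
        let tmp : List Char :=
          (PySem.List.pyRange 0 (iw.1 + 1) 1).foldl
            (fun t x =>
              t ++ [if x == 0 then PySem.Chars.upperChar iw.2 else PySem.Chars.lowerChar iw.2])
            []
        acc ++ [tmp])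
      []
  String.ofList (PySem.Chars.join ['-'] result)

-- ===== PORT B =====
-- B: '-'.join(c.upper() + c.lower() * i for i, c in enumerate(s))
def accum_alt (s : String) : String :=
  String.ofList (PySem.Chars.join ['-']
    ((PySem.List.enumerate s.toList).map
      (fun ic => [PySem.Chars.upperChar ic.2] ++ PySem.List.pyRepeat [PySem.Chars.lowerChar ic.2] ic.1)))

-- ===== PRECONDITION & SPEC =====
def Spec_accum (s : String) (out : String) : Prop := out = accum_alt s
instance (s : String) (out : String) : Decidable (Spec_accum s out) := by unfold Spec_accum; infer_instance

-- ===== CLAIM (what is proved, stated in full; the proofs are below) =====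
def Claim_equal_accum : Prop := ∀ (s : String), Dom_accum s → Spec_accum s (accum s)

-- ===== LEMMAS AND PROOFS =====

-- A's inner loop over range(i+1) produces the upper char followed by i lower chars.
theorem accum_inner (k : Nat) (w : Char) :
    (PySem.List.pyRange 0 ((k : Int) + 1) 1).foldl
      (fun t x =>
        t ++ [if x == 0 then PySem.Chars.upperChar w else PySem.Chars.lowerChar w]) []
    = [PySem.Chars.upperChar w] ++ PySem.List.pyRepeat [PySem.Chars.lowerChar w] (k : Int) := by
  rw [PySem.List.foldl_append_singleton_eq_map]
  have h1 : ((k : Int) + 1) = ((k + 1 : Nat) : Int) := by push_cast; ring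
  rw [h1, PySem.List.pyRange_zero_natCast, List.range_succ_eq_map,
      PySem.List.pyRepeat_singleton]
  simp [List.map_map]
  rw [List.eq_replicate_iff]
  constructor
  · simp
  · intro b hb
    simp only [List.mem_map, List.mem_range] at hb
    obtain ⟨m, _, rfl⟩ := hb
    simp [Function.comp]
    exact fun h => absurd h (by positivity)

-- every pair produced by enumerate from 0 has a natural first component
theorem accum_enum_nat (l : List Char) (p : Int × Char)
    (hp : p ∈ PySem.List.enumerate l 0) : ∃ k : Nat, p.1 = (k : Int) := by
  rw [PySem.List.mem_enumerate_iff] at hp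
  obtain ⟨k, hk, rfl⟩ := hp
  exact ⟨k, by simp⟩

-- A's outer loop builds exactly B's mapped segment list
theorem accum_outer (l : List Char) :
    (PySem.List.enumerate l).foldl
      (fun acc iw =>
        acc ++ [(PySem.List.pyRange 0 (iw.1 + 1) 1).foldl
          (fun t x =>
            t ++ [if x == 0 then PySem.Chars.upperChar iw.2 else PySem.Chars.lowerChar iw.2]) []])
      []
    = (PySem.List.enumerate l).map
        (fun ic => [PySem.Chars.upperChar ic.2] ++ PySem.List.pyRepeat [PySem.Chars.lowerChar ic.2] ic.1) := by
  rw [PySem.List.foldl_congr_mem _ _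
    (fun acc iw => acc ++ [[PySem.Chars.upperChar iw.2] ++ PySem.List.pyRepeat [PySem.Chars.lowerChar iw.2] iw.1])]
  · exact PySem.List.foldl_append_singleton_eq_map _ _ _
  · intro acc p hp
    obtain ⟨k, hk⟩ := accum_enum_nat l p hp
    rw [hk, accum_inner]

-- ===== VERDICT (by name: the statement is the Claim_ definition above) =====
theorem accum_spec : Claim_equal_accum := by
  intro s _
  unfold Spec_accum accum accum_alt
  simp only []
  rw [accum_outer]
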